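-- pv_equiv track=rewrite | github.com/HeeJeongOh/algorithm | programmers/p82612.py | solution
-- ===== SOURCE A (Python) =====
-- def solution(price, money, count):
--     need = 0
--     for i in range(1, count+1):
--         need += price*i
--     if need-money <= 0:
--         return 0
--     else:
--         return need-money
-- ===== SOURCE B (Python) =====
-- def solution(price, money, count):
--     n = count if count > 0 else 0
--     total = price * n * (n + 1) // 2
--     diff = total - money
--     return diff if diff > 0 else 0
-- ===== Notes on version B (the rewrite author's own statement) =====
-- stated objective: faster
-- what changed: replaces the O(count) summation loop with the arithmetic-series closed form price*n*(n+1)//2 and a max-with-zero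
import Mathlib
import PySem

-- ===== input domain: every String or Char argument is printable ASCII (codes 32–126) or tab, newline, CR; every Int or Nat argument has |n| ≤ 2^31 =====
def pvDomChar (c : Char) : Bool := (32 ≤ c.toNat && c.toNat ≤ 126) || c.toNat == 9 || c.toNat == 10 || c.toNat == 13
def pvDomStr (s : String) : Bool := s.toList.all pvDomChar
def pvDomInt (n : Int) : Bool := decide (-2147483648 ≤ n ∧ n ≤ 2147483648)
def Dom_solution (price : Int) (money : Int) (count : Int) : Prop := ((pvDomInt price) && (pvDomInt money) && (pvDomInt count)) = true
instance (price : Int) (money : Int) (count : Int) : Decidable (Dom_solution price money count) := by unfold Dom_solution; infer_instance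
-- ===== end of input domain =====

-- B replaces A's O(count) summation loop with the closed form price*n*(n+1)//2 (faster).

-- ===== PORT A =====
def solution (price : Int) (money : Int) (count : Int) : Int :=
  let need := (PySem.List.pyRange 1 (count + 1) 1).foldl (fun need i => need + price * i) 0
  if need - money ≤ 0 then 0 else need - money

-- ===== PORT B =====
def solution_alt (price : Int) (money : Int) (count : Int) : Int :=
  let n := if count > 0 then count else 0
  let total := PySem.Int.floordiv (price * n * (n + 1)) 2
  let diff := total - money
  if diff > 0 then diff else 0

-- ===== PRECONDITION & SPEC =====
def Spec_solution (price : Int) (money : Int) (count : Int) (out : Int) : Prop := out = solution_alt price money count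
instance (price : Int) (money : Int) (count : Int) (out : Int) : Decidable (Spec_solution price money count out) := by unfold Spec_solution; infer_instance

-- ===== CLAIM (what is proved, stated in full; the proofs are below) =====
def Claim_equal_solution : Prop := ∀ (price : Int) (money : Int) (count : Int), Dom_solution price money count → Spec_solution price money count (solution price money count)

-- ===== LEMMAS AND PROOFS =====

-- The loop sum over range(1, n+1) equals price * (n*(n+1)/2).
theorem pv_sum_loop (price : Int) (n : Nat) :
    (PySem.List.pyRange 1 ((n : Int) + 1) 1).foldl (fun need i => need + price * i) 0
      = price * ((n * (n + 1) / 2 : Nat) : Int) := by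
  induction n with
  | zero => simp [PySem.List.pyRange_one_eq_nil]
  | succ k ih =>
    have h : (1 : Int) ≤ (k : Int) + 1 := by omega
    rw [show ((k + 1 : Nat) : Int) + 1 = ((k : Int) + 1) + 1 by push_cast; ring,
        PySem.List.pyRange_one_succ_right (a := 1) (b := (k : Int) + 1) h,
        List.foldl_append, ih]
    simp only [List.foldl_cons, List.foldl_nil]
    have hnat : k * (k + 1) / 2 + (k + 1) = (k + 1) * (k + 1 + 1) / 2 := by
      have h2 : k * (k + 1) % 2 = 0 := Nat.even_iff.mp (Nat.even_mul_succ_self k)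
      have h3 : (k + 1) * (k + 1 + 1) = k * (k + 1) + 2 * (k + 1) := by ring
      omega
    calc price * ((k * (k + 1) / 2 : Nat) : Int) + price * ((k : Int) + 1)
        = price * (((k * (k + 1) / 2 : Nat) : Int) + ((k + 1 : Nat) : Int)) := by push_cast; ring
      _ = price * (((k + 1) * (k + 1 + 1) / 2 : Nat) : Int) := by
            rw [show ((k * (k + 1) / 2 : Nat) : Int) + ((k + 1 : Nat) : Int)
                  = (((k * (k + 1) / 2 + (k + 1)) : Nat) : Int) by push_cast; ring, hnat]

-- ===== VERDICT (by name: the statement is the Claim_ definition above) =====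
theorem solution_spec : Claim_equal_solution := by
  intro price money count _
  unfold Spec_solution solution solution_alt
  by_cases hc : count > 0
  · obtain ⟨n, hn⟩ : ∃ n : Nat, count = (n : Int) := ⟨count.toNat, by omega⟩
    subst hn
    simp only [hc, if_pos]
    rw [pv_sum_loop]
    simp only [PySem.Int.floordiv]
    obtain ⟨a, ha⟩ : (2 : Int) ∣ (n : Int) * (n + 1) := (Int.even_mul_succ_self (n : Int)).two_dvd
    have e1 : ((n * (n + 1) / 2 : Nat) : Int) = a := by
      have hm : n * (n + 1) % 2 = 0 := Nat.even_iff.mp (Nat.even_mul_succ_self n)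
      have hc2 : ((n * (n + 1) : Nat) : Int) = 2 * a := by push_cast; linarith [ha]
      omega
    have e2 : (price * (n : Int) * ((n : Int) + 1)).fdiv 2 = price * a := by
      rw [show price * (n : Int) * ((n : Int) + 1) = price * ((n : Int) * ((n : Int) + 1)) by ring,
          ha, show price * (2 * a) = 2 * (price * a) by ring, Int.mul_fdiv_cancel_left _ (by norm_num)]
    rw [e1, e2]
    split_ifs <;> omega
  · have : PySem.List.pyRange 1 (count + 1) 1 = [] :=
      PySem.List.pyRange_one_eq_nil (by omega)
    rw [this]
    simp only [List.foldl_nil, if_neg hc]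
    norm_num [PySem.Int.floordiv]
    split_ifs <;> omega
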